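-- pv_equiv track=rewrite | github.com/sfranck72/MSXCompiler_V9990 | MSXCompiler_16_or_64_colors_V2.py | rgb0_to_bgr
-- ===== SOURCE A (Python) =====
-- def rgb0_to_bgr(lst):
--     result = []
--     # Process list in steps of 4
--     for i in range(0, len(lst), 4):
--         group = lst[i:i + 4]
--
--         # Only process full groups of 4
--         if len(group) == 4:
--             a, b, c, d = group  # unpack
--             result.extend([c, b, a])  # swap a & c, remove d
--     return result
-- ===== SOURCE B (Python) =====
-- def rgb0_to_bgr(lst):
--     # Group the list four-at-a-time with an iterator zip (zip drops a partial
--     # trailing group), emitting c, b, a for each group (a, b, c, d).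
--     it = iter(lst)
--     out = []
--     for a, b, c, d in zip(it, it, it, it):
--         out.extend((c, b, a))
--     return out
-- ===== Notes on version B (the rewrite author's own statement) =====
-- stated objective: idiomatic
-- what changed: Replaces index stepping by 4 with contiguous slicing and a length check by consuming the list four-at-a-time through an iterator zip, which drops the partial trailing group by construction.
import Mathlib
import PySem

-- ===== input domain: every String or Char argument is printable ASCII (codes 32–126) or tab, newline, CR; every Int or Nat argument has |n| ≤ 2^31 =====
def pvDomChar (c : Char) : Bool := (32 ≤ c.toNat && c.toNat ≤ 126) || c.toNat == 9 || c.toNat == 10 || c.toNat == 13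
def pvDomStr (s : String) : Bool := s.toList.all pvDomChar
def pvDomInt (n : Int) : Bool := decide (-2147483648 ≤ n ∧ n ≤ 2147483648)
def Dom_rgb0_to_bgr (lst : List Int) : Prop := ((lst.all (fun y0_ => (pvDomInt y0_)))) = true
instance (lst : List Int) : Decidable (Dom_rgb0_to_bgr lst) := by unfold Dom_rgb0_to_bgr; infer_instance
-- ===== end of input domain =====

-- B groups the list four-at-a-time via an iterator zip instead of A's index
-- stepping with contiguous slices; same return value, idiomatic decomposition.

-- ===== PORT A =====
-- 'if len(group) == 4: a, b, c, d = group' is the single pattern match below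
def rgb0_to_bgr (lst : List Int) : List Int :=
  (PySem.List.pyRange 0 (PySem.List.len lst) 4).foldl
    (fun result i =>
      match PySem.List.slice lst (some i) (some (i + 4)) with
      | [a, b, c, _d] => result ++ [c, b, a]
      | _ => result)
    []

-- ===== PORT B =====
-- the 'for a, b, c, d in zip(it, it, it, it)' loop: consume four elements per
-- step (a partial trailing group ends the loop), extending the accumulator
def pvAltChunkLoop (out : List Int) (lst : List Int) : List Int :=
  match lst with
  | a :: rest1 =>
    match rest1 with
    | b :: rest2 =>
      match rest2 with
      | c :: rest3 =>
        match rest3 with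
        | _d :: rest => pvAltChunkLoop (out ++ [c, b, a]) rest
        | [] => out
      | [] => out
    | [] => out
  | [] => out

def rgb0_to_bgr_alt (lst : List Int) : List Int :=
  pvAltChunkLoop [] lst

-- ===== PRECONDITION & SPEC =====
def Spec_rgb0_to_bgr (lst : List Int) (out : List Int) : Prop := out = rgb0_to_bgr_alt lst
instance (lst : List Int) (out : List Int) : Decidable (Spec_rgb0_to_bgr lst out) := by unfold Spec_rgb0_to_bgr; infer_instance

-- ===== CLAIM (what is proved, stated in full; the proofs are below) =====
def Claim_equal_rgb0_to_bgr : Prop := ∀ (lst : List Int), Dom_rgb0_to_bgr lst → Spec_rgb0_to_bgr lst (rgb0_to_bgr lst)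

-- ===== LEMMAS AND PROOFS =====

-- step-4 range peels its first element
lemma pyRange4_cons (a b : Int) (h : a < b) :
    PySem.List.pyRange a b 4 = a :: PySem.List.pyRange (a + 4) b 4 := by
  rw [PySem.List.pyRange_of_pos a b (by norm_num : (0:Int) < 4),
      PySem.List.pyRange_of_pos (a + 4) b (by norm_num : (0:Int) < 4)]
  by_cases h4 : a + 4 < b
  · have : ((b - a + 4 - 1) / 4).toNat = ((b - (a + 4) + 4 - 1) / 4).toNat + 1 := by omega
    simp only [if_pos h, if_pos h4, this, List.range_succ_eq_map, List.map_cons, List.map_map]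
    congr 1
    · simp
    · apply List.map_congr_left; intro k _; simp [Function.comp]; ring
  · have : ((b - a + 4 - 1) / 4).toNat = 1 := by omega
    simp [if_pos h, if_neg h4, this, List.range_succ]

-- shifting a step-4 range by 4
lemma pyRange4_shift (b : Int) :
    PySem.List.pyRange 4 (b + 4) 4 = (PySem.List.pyRange 0 b 4).map (· + 4) := by
  rw [PySem.List.pyRange_of_pos 4 (b + 4) (by norm_num : (0:Int) < 4),
      PySem.List.pyRange_of_pos 0 b (by norm_num : (0:Int) < 4)]
  have hcond : (4:Int) < b + 4 ↔ 0 < b := by omega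
  have hcnt : ((b + 4 - 4 + 4 - 1) / 4).toNat = ((b - 0 + 4 - 1) / 4).toNat := by omega
  simp only [hcond, hcnt, List.map_map]
  split_ifs with h
  · apply List.map_congr_left; intro k _; simp [Function.comp]; ring
  · simp

-- the A-loop body appends a chunk: foldl = acc ++ flatMap of chunks
lemma A_foldl_flatMap (lst : List Int) (r : List Int) (acc : List Int) :
    r.foldl (fun result i =>
        match PySem.List.slice lst (some i) (some (i + 4)) with
        | [a, b, c, _d] => result ++ [c, b, a]
        | _ => result) acc
      = acc ++ r.flatMap (fun i =>
          match PySem.List.slice lst (some i) (some (i + 4)) with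
          | [a, b, c, _d] => [c, b, a]
          | _ => []) := by
  induction r generalizing acc with
  | nil => simp
  | cons i r ih =>
      simp only [List.foldl_cons, List.flatMap_cons, ih]
      rcases hs : PySem.List.slice lst (some i) (some (i + 4)) with _ | ⟨a, _ | ⟨b, _ | ⟨c, _ | ⟨d, _ | ⟨e, t⟩⟩⟩⟩⟩ <;>
        simp

-- a nonnegative slice is drop/take, and shifts past a 4-prefix
lemma slice_shift4 (a b c d : Int) (rest : List Int) (i : Int) (hi : 0 ≤ i) :
    PySem.List.slice (a :: b :: c :: d :: rest) (some (i + 4)) (some (i + 4 + 4))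
      = PySem.List.slice rest (some i) (some (i + 4)) := by
  rw [PySem.List.slice_toNat _ (by omega) (by omega),
      PySem.List.slice_toNat _ hi (by omega)]
  have h1 : (i + 4).toNat = i.toNat + 4 := by omega
  have h2 : (i + 4 + 4).toNat = (i.toNat + 4) + 4 := by omega
  have h3 : (i + 4).toNat - i.toNat = 4 := by omega
  simp [h1, h2, List.drop_succ_cons]

lemma pvAltChunkLoop_acc_aux : ∀ (n : Nat) (lst : List Int), lst.length = n → ∀ (acc : List Int),
    pvAltChunkLoop acc lst = acc ++ pvAltChunkLoop [] lst := by
  intro n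
  induction n using Nat.strong_induction_on with
  | _ n ih =>
      intro lst hl acc
      rcases lst with _ | ⟨a, _ | ⟨b, _ | ⟨c, _ | ⟨d, rest⟩⟩⟩⟩
      · simp [pvAltChunkLoop]
      · simp [pvAltChunkLoop]
      · simp [pvAltChunkLoop]
      · simp [pvAltChunkLoop]
      · have hlt : rest.length < n := by simp at hl; omega
        have e1 : ∀ (o : List Int), pvAltChunkLoop o (a :: b :: c :: d :: rest)
            = pvAltChunkLoop (o ++ [c, b, a]) rest := fun o => rfl
        rw [e1, e1, ih rest.length hlt rest rfl (acc ++ [c, b, a]),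
            ih rest.length hlt rest rfl ([] ++ [c, b, a])]
        simp

lemma pvAltChunkLoop_acc (lst : List Int) (acc : List Int) :
    pvAltChunkLoop acc lst = acc ++ pvAltChunkLoop [] lst :=
  pvAltChunkLoop_acc_aux lst.length lst rfl acc

lemma main_eq_aux : ∀ (n : Nat) (lst : List Int), lst.length = n →
    rgb0_to_bgr lst = rgb0_to_bgr_alt lst := by
  intro n
  induction n using Nat.strong_induction_on with
  | _ n ihn =>
      intro lst hl
      rcases lst with _ | ⟨a, _ | ⟨b, _ | ⟨c, _ | ⟨d, rest⟩⟩⟩⟩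
      · rfl
      · simp [rgb0_to_bgr, rgb0_to_bgr_alt, pvAltChunkLoop,
              PySem.List.len_eq, PySem.List.slice, PySem.List.clampIdx,
              show PySem.List.pyRange 0 1 4 = [0] from by decide]
      · simp [rgb0_to_bgr, rgb0_to_bgr_alt, pvAltChunkLoop,
              PySem.List.len_eq, PySem.List.slice, PySem.List.clampIdx,
              show PySem.List.pyRange 0 2 4 = [0] from by decide]
      · simp [rgb0_to_bgr, rgb0_to_bgr_alt, pvAltChunkLoop,
              PySem.List.len_eq, PySem.List.slice, PySem.List.clampIdx,
              show PySem.List.pyRange 0 3 4 = [0] from by decide]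
      have ih : rgb0_to_bgr rest = rgb0_to_bgr_alt rest :=
        ihn rest.length (by simp at hl; omega) rest rfl
      unfold rgb0_to_bgr rgb0_to_bgr_alt
      rw [A_foldl_flatMap]
      have hlen : PySem.List.len (a :: b :: c :: d :: rest) = (rest.length : Int) + 4 := by
        simp [PySem.List.len_eq]; omega
      rw [hlen, pyRange4_cons 0 ((rest.length : Int) + 4) (by omega)]
      have hshift := pyRange4_shift (rest.length : Int)
      rw [show (0 : Int) + 4 = 4 from by ring, hshift]
      simp only [List.flatMap_cons, List.flatMap_map, List.nil_append]
      have hslice0 : PySem.List.slice (a :: b :: c :: d :: rest) (some 0) (some (0 + 4))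
          = [a, b, c, d] := by
        rw [PySem.List.slice_toNat _ (by omega) (by omega)]; rfl
      rw [hslice0]
      have hrest : (PySem.List.pyRange 0 (rest.length : Int) 4).flatMap
          (fun i =>
            match PySem.List.slice (a :: b :: c :: d :: rest) (some (i + 4)) (some (i + 4 + 4)) with
            | [a, b, c, _d] => [c, b, a]
            | _ => [])
          = (PySem.List.pyRange 0 (rest.length : Int) 4).flatMap
            (fun i =>
              match PySem.List.slice rest (some i) (some (i + 4)) with
              | [a, b, c, _d] => [c, b, a]
              | _ => []) := by
        refine List.flatMap_congr ?_
        intro i hi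
        have h0 : 0 ≤ i := by
          have := (PySem.List.mem_pyRange_iff_of_pos (by norm_num : (0:Int) < 4) i).mp hi
          omega
        rw [slice_shift4 a b c d rest i h0]
      rw [hrest]
      rw [show pvAltChunkLoop [] (a :: b :: c :: d :: rest)
            = pvAltChunkLoop ([] ++ [c, b, a]) rest from rfl,
          pvAltChunkLoop_acc]
      unfold rgb0_to_bgr rgb0_to_bgr_alt at ih
      rw [A_foldl_flatMap, List.nil_append] at ih
      simp only [PySem.List.len_eq] at ih
      simp [ih]

lemma main_eq (lst : List Int) : rgb0_to_bgr lst = rgb0_to_bgr_alt lst :=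
  main_eq_aux lst.length lst rfl

-- ===== VERDICT (by name: the statement is the Claim_ definition above) =====
theorem rgb0_to_bgr_spec : Claim_equal_rgb0_to_bgr := by
  intro lst _
  unfold Spec_rgb0_to_bgr
  exact main_eq lst
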